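-- pv_equiv track=rewrite | github.com/amit-420/py2048 | test3.py | spidy
-- ===== SOURCE A (Python) =====
-- def spidy(l):
--     random_list = []
--     x = 0
--     for i in range(len(l)):
--         for j in range(len(l)):
--             if l[i][j] == 0:
--                 list1 = [i,j]
--                 random_list.append(list1)
--             elif l[i][j] > x:
--                 x = l[i][j]
--     return random_list,x
-- ===== SOURCE B (Python) =====
-- def spidy(l):
--     n = len(l)
--     zeros = [[i, j] for i in range(n) for j in range(n) if l[i][j] == 0]
--     m = max([0] + [l[i][j] for i in range(n) for j in range(n)])
--     return zeros, m
-- ===== Notes on version B (the rewrite author's own statement) =====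
-- stated objective: simpler
-- what changed: replaces the single accumulator loop by two independent passes: a comprehension collecting zero positions and a seeded max over all cells
import Mathlib
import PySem

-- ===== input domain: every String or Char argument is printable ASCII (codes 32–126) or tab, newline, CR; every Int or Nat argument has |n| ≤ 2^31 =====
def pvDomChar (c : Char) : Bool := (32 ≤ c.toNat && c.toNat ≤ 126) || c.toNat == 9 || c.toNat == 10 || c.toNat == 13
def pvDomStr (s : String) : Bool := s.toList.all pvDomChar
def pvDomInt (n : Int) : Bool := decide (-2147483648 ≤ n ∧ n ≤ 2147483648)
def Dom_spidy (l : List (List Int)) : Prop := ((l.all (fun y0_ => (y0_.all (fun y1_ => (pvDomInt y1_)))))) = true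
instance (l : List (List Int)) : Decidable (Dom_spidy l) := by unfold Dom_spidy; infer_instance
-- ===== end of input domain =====

-- B changes the decomposition: one accumulator loop becomes two independent passes (a zero-position comprehension and a seeded max); same cost, simpler.

-- l[i][j], total via getD; Pre_spidy guarantees the indices are in range wherever it is used
def pvCell (l : List (List Int)) (i j : Int) : Int :=
  (PySem.List.pyGet? ((PySem.List.pyGet? l i).getD []) j).getD 0

-- ===== PORT A =====
def spidy (l : List (List Int)) : List (List Int) × Int :=
  (PySem.List.pyRange 0 l.length 1).foldl
    (fun st i =>
      (PySem.List.pyRange 0 l.length 1).foldl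
        (fun st j =>
          if pvCell l i j = 0 then (st.1 ++ [[i, j]], st.2)
          else if st.2 < pvCell l i j then (st.1, pvCell l i j) else st)
        st)
    (([] : List (List Int)), (0 : Int))

-- ===== PORT B =====
def spidy_alt (l : List (List Int)) : List (List Int) × Int :=
  let n : Int := l.length
  let zeros := (PySem.List.pyRange 0 n 1).flatMap
    (fun i => ((PySem.List.pyRange 0 n 1).filter (fun j => pvCell l i j == 0)).map
      (fun j => [i, j]))
  let m := ((PySem.List.pyRange 0 n 1).flatMap
    (fun i => (PySem.List.pyRange 0 n 1).map (fun j => pvCell l i j))).foldl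
      (fun a v => max a v) 0
  (zeros, m)

-- ===== PRECONDITION & SPEC =====
-- Pre_: Python A indexes every row of the square grid at columns 0..len(l)-1, so each row must have at least len(l) entries (else IndexError)
def Pre_spidy (l : List (List Int)) : Prop := ∀ row ∈ l, l.length ≤ row.length
instance (l : List (List Int)) : Decidable (Pre_spidy l) := by unfold Pre_spidy; infer_instance
def pvWitness_spidy : List (List Int) := [[0, 5], [3, -1]]

def Spec_spidy (l : List (List Int)) (out : List (List Int) × Int) : Prop := out = spidy_alt l
instance (l : List (List Int)) (out : List (List Int) × Int) : Decidable (Spec_spidy l out) := by unfold Spec_spidy; infer_instance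

-- ===== CLAIM (what is proved, stated in full; the proofs are below) =====
def Claim_equal_spidy : Prop := ∀ (l : List (List Int)), Dom_spidy l → Pre_spidy l → Spec_spidy l (spidy l)

-- ===== LEMMAS AND PROOFS =====

-- the value of A's inner loop body depends on the components independently, so the inner fold splits
theorem inner_split (l : List (List Int)) (i : Int) (J : List Int) (rl : List (List Int)) (x : Int) :
    J.foldl
        (fun st j =>
          if pvCell l i j = 0 then (st.1 ++ [[i, j]], st.2)
          else if st.2 < pvCell l i j then (st.1, pvCell l i j) else st)
        (rl, x)
      = (rl ++ (J.filter (fun j => pvCell l i j == 0)).map (fun j => [i, j]),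
         J.foldl (fun a j => if pvCell l i j = 0 then a else max a (pvCell l i j)) x) := by
  induction J generalizing rl x with
  | nil => simp
  | cons j J ih =>
    by_cases h : pvCell l i j = 0
    · simp [h, ih]
    · by_cases h2 : x < pvCell l i j
      · simp [h, h2, ih, max_eq_right (le_of_lt h2)]
      · simp [h, h2, ih, max_eq_left (le_of_not_gt h2)]

-- A's skip-zero max step keeps the accumulator nonnegative…
theorem inner_max_nonneg (l : List (List Int)) (i : Int) (J : List Int) (x : Int) (hx : 0 ≤ x) :
    0 ≤ J.foldl (fun a j => if pvCell l i j = 0 then a else max a (pvCell l i j)) x := by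
  induction J generalizing x with
  | nil => exact hx
  | cons j J ih =>
    simp only [List.foldl_cons]
    split
    · exact ih x hx
    · exact ih _ (le_trans hx (le_max_left _ _))

-- …so on a nonnegative accumulator it agrees with the plain running max
theorem inner_max_eq (l : List (List Int)) (i : Int) (J : List Int) (x : Int) (hx : 0 ≤ x) :
    J.foldl (fun a j => if pvCell l i j = 0 then a else max a (pvCell l i j)) x
      = J.foldl (fun a j => max a (pvCell l i j)) x := by
  induction J generalizing x with
  | nil => rfl
  | cons j J ih =>
    simp only [List.foldl_cons]
    by_cases h : pvCell l i j = 0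
    · rw [if_pos h, ih x hx, h, max_eq_left hx]
    · rw [if_neg h]; exact ih _ (le_trans hx (le_max_left _ _))

-- the outer fold splits into B's two passes
theorem outer_split (l : List (List Int)) (J : List Int) (I : List Int) (rl : List (List Int)) (x : Int) (hx : 0 ≤ x) :
    I.foldl
        (fun st i =>
          J.foldl
            (fun st j =>
              if pvCell l i j = 0 then (st.1 ++ [[i, j]], st.2)
              else if st.2 < pvCell l i j then (st.1, pvCell l i j) else st)
            st)
        (rl, x)
      = (rl ++ I.flatMap (fun i => (J.filter (fun j => pvCell l i j == 0)).map (fun j => [i, j])),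
         I.foldl (fun a i => J.foldl (fun a j => max a (pvCell l i j)) a) x) := by
  induction I generalizing rl x with
  | nil => simp
  | cons i I ih =>
    simp only [List.foldl_cons, List.flatMap_cons]
    have hnn : 0 ≤ J.foldl (fun a j => max a (pvCell l i j)) x := by
      rw [← inner_max_eq l i J x hx]; exact inner_max_nonneg l i J x hx
    rw [inner_split, inner_max_eq l i J x hx, ih _ _ hnn]
    simp

-- ===== VERDICT (by name: the statement is the Claim_ definition above) =====
theorem spidy_spec : Claim_equal_spidy := by
  intro l _ _
  unfold Spec_spidy spidy spidy_alt
  rw [outer_split l _ _ [] 0 le_rfl]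
  simp [List.foldl_flatMap, List.foldl_map]
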